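-- pv_equiv track=rewrite | github.com/beejjorgensen/aoc2021 | day12/solution2.py | dup_small_count
-- ===== SOURCE A (Python) =====
-- def dup_small_count(path):
-- 	count = {}
--
-- 	for n in path:
-- 		if n.islower():
-- 			if n not in count:
-- 				count[n] = 0
-- 			count[n] += 1
--
-- 	dup_count = 0
--
-- 	for v in count.values():
-- 		if v > 1:
-- 			dup_count += 1
--
-- 	return dup_count
-- ===== SOURCE B (Python) =====
-- def dup_small_count(path):
-- 	xs = sorted(n for n in path if n.islower())
-- 	dup = 0
-- 	i = 0
-- 	while i < len(xs):
-- 		j = i + 1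
-- 		while j < len(xs) and xs[j] == xs[i]:
-- 			j += 1
-- 		if j - i > 1:
-- 			dup += 1
-- 		i = j
-- 	return dup
-- ===== Notes on version B (the rewrite author's own statement) =====
-- stated objective: alternative
-- what changed: Replaces the count-dictionary tally plus a second value-scanning pass with sort-then-run-scan: the lowercase nodes are sorted, equal nodes become adjacent runs, and one scan counts runs of length greater than one.
import Mathlib
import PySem

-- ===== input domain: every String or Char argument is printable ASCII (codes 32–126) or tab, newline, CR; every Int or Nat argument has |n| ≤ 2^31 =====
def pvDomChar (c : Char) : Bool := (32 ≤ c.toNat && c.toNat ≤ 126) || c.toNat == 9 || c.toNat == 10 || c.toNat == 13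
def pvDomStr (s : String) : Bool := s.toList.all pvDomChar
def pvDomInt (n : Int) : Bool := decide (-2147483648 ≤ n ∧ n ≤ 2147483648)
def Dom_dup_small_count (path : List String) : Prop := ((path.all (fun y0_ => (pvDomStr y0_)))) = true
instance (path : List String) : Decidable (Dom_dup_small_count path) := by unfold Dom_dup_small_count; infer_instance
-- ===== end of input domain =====

-- B replaces A's count-dictionary tally + second value pass by sort-then-run-scan over the sorted lowercase nodes; objective: alternative.

-- shared helper: Python str.islower() — exact on the ASCII domain (cased ASCII chars are exactly the letters):
-- true iff the string has at least one lowercase letter and no uppercase letter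
def pyStrIslower (s : String) : Bool :=
  s.toList.any PySem.Chars.islower && s.toList.all (fun c => !PySem.Chars.isupper c)

-- ===== PORT A =====
def dup_small_count (path : List String) : Int :=
  let count : PySem.Dict String Int :=
    path.foldl (fun d n =>
      if pyStrIslower n then
        let d1 := if d.contains n then d else d.insert n 0
        d1.insert n (d1.getD n 0 + 1)
      else d) PySem.Dict.empty
  count.values.foldl (fun acc v => if v > 1 then acc + 1 else acc) 0

-- ===== PORT B =====
-- _prefix_len(xs, x): length of the leading run of xs equal to x
def prefixLenB (xs : List String) (x : String) : Nat :=
  match xs with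
  | [] => 0
  | y :: t => if y = x then 1 + prefixLenB t x else 0

-- _run_count(xs): count runs of length > 1 by recursive descent on the list
def runCountB (xs : List String) : Int :=
  match h : xs with
  | [] => 0
  | x :: rest =>
    let run := prefixLenB rest x
    (if run > 0 then 1 else 0) + runCountB (rest.drop run)
termination_by xs.length
decreasing_by
  simp only [List.length_drop, List.length_cons]; omega

def dup_small_count_alt (path : List String) : Int :=
  let xs := PySem.List.sorted (path.filter pyStrIslower) (fun x => x) false
  runCountB xs

-- ===== PRECONDITION & SPEC =====
def Spec_dup_small_count (path : List String) (out : Int) : Prop := out = dup_small_count_alt path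
instance (path : List String) (out : Int) : Decidable (Spec_dup_small_count path out) := by unfold Spec_dup_small_count; infer_instance

-- ===== CLAIM (what is proved, stated in full; the proofs are below) =====
def Claim_equal_dup_small_count : Prop := ∀ (path : List String), Dom_dup_small_count path → Spec_dup_small_count path (dup_small_count path)

-- ===== LEMMAS AND PROOFS =====

-- A's in-loop body (test, insert 0, then add 1) is exactly Counter's modify step
theorem body_eq_modify (d : PySem.Dict String Int) (n : String) :
    (let d1 := if d.contains n then d else d.insert n 0
     d1.insert n (d1.getD n 0 + 1)) = d.modify n 0 (· + 1) := by
  cases hF : d.contains n with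
  | true => simp [PySem.Dict.modify]
  | false =>
    have hne : ∀ p ∈ d.items, ¬ p.1 = n := by
      simp only [PySem.Dict.contains, List.any_eq_false] at hF
      intro p hp
      simpa using hF p hp
    have h0 : d.getD n 0 = 0 := by
      simp only [PySem.Dict.getD, PySem.Dict.get?]
      rw [List.find?_eq_none.2 (by intro p hp; simpa using hne p hp)]
      rfl
    simp only [Bool.false_eq_true, ite_false, PySem.Dict.modify]
    rw [PySem.Dict.getD_insert_self, h0]
    apply PySem.Dict.ext
    have hins : d.insert n 0 = PySem.Dict.mk (d.items ++ [(n, 0)]) := by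
      simp [PySem.Dict.insert, hF]
    have hc1 : (PySem.Dict.mk (d.items ++ [(n, 0)]) : PySem.Dict String Int).contains n = true := by
      simp [PySem.Dict.contains]
    rw [hins]
    simp only [PySem.Dict.insert, hc1, ite_true, hF, Bool.false_eq_true, ite_false]
    simp only [List.map_append]
    have hmap : List.map (fun p : String × Int => if p.1 = n then (n, 1) else p) d.items = d.items := by
      conv_rhs => rw [← List.map_id d.items]
      apply List.map_congr_left
      intro p hp
      simp [hne p hp]
    simpa using hmap

-- A computes the number of distinct lowercase strings with count > 1
theorem A_eq_spec (path : List String) :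
    dup_small_count path =
      ((PySem.Set.ofList (path.filter pyStrIslower)).countP
        (fun k => 1 < (path.filter pyStrIslower).count k) : Int) := by
  unfold dup_small_count
  have h1 : path.foldl (fun d n =>
      if pyStrIslower n then
        let d1 := if d.contains n then d else d.insert n 0
        d1.insert n (d1.getD n 0 + 1)
      else d) PySem.Dict.empty = PySem.Dict.counter (path.filter pyStrIslower) := by
    rw [PySem.Dict.counter_eq_foldl, List.foldl_filter]
    congr 1
    funext d n
    by_cases hp : pyStrIslower n <;> simp [hp, body_eq_modify]
  rw [h1]
  simp only [gt_iff_lt]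
  have hv : (PySem.Dict.counter (path.filter pyStrIslower)).values
      = (PySem.Set.ofList (path.filter pyStrIslower)).map
          (fun k => ((path.filter pyStrIslower).count k : Int)) := by
    show ((PySem.Dict.counter (path.filter pyStrIslower)).items).map (·.2) = _
    rw [PySem.Dict.items_counter]
    simp
  rw [hv]
  have hfc := PySem.List.foldl_count_if (fun v : Int => decide (1 < v))
    ((PySem.Set.ofList (path.filter pyStrIslower)).map
      (fun k => ((path.filter pyStrIslower).count k : Int))) 0
  simp only [decide_eq_true_eq] at hfc
  rw [hfc, List.countP_map]
  norm_num
  apply List.countP_congr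
  intro k _
  simp [Function.comp]

-- prefixLenB is the length of the matching takeWhile prefix
theorem prefixLenB_eq_takeWhile (xs : List String) (x : String) :
    prefixLenB xs x = (xs.takeWhile (fun y => y == x)).length := by
  induction xs with
  | nil => rfl
  | cons y t ih =>
    by_cases h : y = x
    · subst h
      simp [prefixLenB, ih, Nat.add_comm]
    · have hb : (y == x) = false := by simpa using h
      simp [prefixLenB, h, hb]

theorem dropWhile_drop (p : String → Bool) (l : List String) :
    l.dropWhile p = l.drop (l.takeWhile p).length := by
  induction l with
  | nil => rfl
  | cons a t ih => by_cases h : p a <;> simp [h, ih]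

-- in a nondecreasing list headed by x, nothing after the leading run of x equals x
theorem sorted_dropWhile_ne (x : String) (rest : List String)
    (hx_le : ∀ y ∈ rest, x ≤ y) (hs : rest.Pairwise (· ≤ ·)) :
    ∀ y ∈ rest.dropWhile (fun y => y == x), y ≠ x := by
  intro y hy
  cases hd : rest.dropWhile (fun y => y == x) with
  | nil => rw [hd] at hy; cases hy
  | cons h t =>
    rw [hd] at hy
    have hh := List.head?_dropWhile_not (fun y => y == x) rest
    rw [hd] at hh
    have hh' : h ≠ x := by simpa using hh
    have hpw : (h :: t).Pairwise (· ≤ ·) := hd ▸ hs.sublist (List.dropWhile_sublist _)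
    have hhr : h ∈ rest := (List.dropWhile_sublist _).subset (by rw [hd]; exact List.mem_cons_self ..)
    have hxh : x < h := lt_of_le_of_ne (hx_le h hhr) (Ne.symm hh')
    rcases List.mem_cons.1 hy with rfl | hyt
    · exact hh'
    · have : h ≤ y := (List.pairwise_cons.1 hpw).1 y hyt
      exact fun h0 => absurd (h0 ▸ this) (not_le.2 hxh)

-- on a nondecreasing list, runCountB counts the distinct elements occurring more than once
theorem runCountB_sorted (n : Nat) (l : List String) (hn : l.length ≤ n)
    (hs : l.Pairwise (· ≤ ·)) :
    runCountB l = ((PySem.Set.ofList l).countP (fun k => 1 < l.count k) : Int) := by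
  induction n generalizing l with
  | zero =>
    have : l = [] := List.eq_nil_of_length_eq_zero (Nat.le_zero.1 hn)
    subst this; simp [runCountB, PySem.Set.ofList]
  | succ n ih =>
    match l with
    | [] => simp [runCountB, PySem.Set.ofList]
    | x :: rest =>
      have hx_le : ∀ y ∈ rest, x ≤ y := by
        intro y hy; exact (List.pairwise_cons.1 hs).1 y hy
      have hs_rest : rest.Pairwise (· ≤ ·) := (List.pairwise_cons.1 hs).2
      set tw := rest.takeWhile (fun y => y == x) with htw
      set dp := rest.dropWhile (fun y => y == x) with hdp
      have hsplit : rest = tw ++ dp := (List.takeWhile_append_dropWhile).symm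
      have htw_all : ∀ y ∈ tw, y = x := by
        intro y hy
        have := List.mem_takeWhile_imp hy
        simpa using this
      -- no element of dp equals x
      have hdp_ne : ∀ y ∈ dp, y ≠ x := sorted_dropWhile_ne x rest hx_le hs_rest
      have hrun : prefixLenB rest x = tw.length := by
        rw [prefixLenB_eq_takeWhile]
      have hdrop : rest.drop (prefixLenB rest x) = dp := by
        rw [hrun, htw, hdp, dropWhile_drop]
      -- unfold one step of runCountB
      rw [runCountB, hdrop]
      have hdp_len : dp.length ≤ n := by
        have h1 : dp.length ≤ rest.length := (List.dropWhile_sublist _).length_le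
        have h2 : rest.length ≤ n := by simpa using Nat.lt_succ_iff.1 (lt_of_lt_of_le (by simp) hn)
        omega
      have hdp_pw : dp.Pairwise (· ≤ ·) := hs_rest.sublist (List.dropWhile_sublist _)
      rw [ih dp hdp_len hdp_pw]
      -- counts
      have hcx : (x :: rest).count x = 1 + tw.length := by
        rw [hsplit, List.count_cons_self, List.count_append]
        have h1 : tw.count x = tw.length := List.count_eq_length.2 (fun y hy => by simp [htw_all y hy])
        have h2 : dp.count x = 0 := List.count_eq_zero.2 (fun h => (hdp_ne x h) rfl)
        omega
      have hcy : ∀ y, y ≠ x → (x :: rest).count y = dp.count y := by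
        intro y hyx
        rw [hsplit, List.count_cons, List.count_append]
        have h1 : tw.count y = 0 := List.count_eq_zero.2 (fun h => hyx (htw_all y h))
        have hxy : ¬ x = y := fun h => hyx h.symm
        simp [hxy, h1]
      -- set perm
      have hmem_l : ∀ y, y ∈ (x :: rest) ↔ (y = x ∨ y ∈ dp) := by
        intro y
        constructor
        · intro hy
          rcases List.mem_cons.1 hy with rfl | hyr
          · exact Or.inl rfl
          · rw [hsplit] at hyr
            rcases List.mem_append.1 hyr with h | h
            · exact Or.inl (htw_all y h)
            · exact Or.inr h
        · rintro (rfl | h)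
          · exact List.mem_cons_self ..
          · exact List.mem_cons_of_mem _ (by rw [hsplit]; exact List.mem_append_right _ h)
      have hx_not_dp : x ∉ PySem.Set.ofList dp := by
        rw [PySem.Set.mem_ofList]
        intro h; exact hdp_ne x h rfl
      have hperm : (PySem.Set.ofList (x :: rest)).Perm (x :: PySem.Set.ofList dp) := by
        rw [List.perm_ext_iff_of_nodup (PySem.Set.nodup_ofList _)
          (List.nodup_cons.2 ⟨hx_not_dp, PySem.Set.nodup_ofList _⟩)]
        intro y
        rw [PySem.Set.mem_ofList, hmem_l y, List.mem_cons, PySem.Set.mem_ofList]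
      rw [hperm.countP_eq]
      rw [List.countP_cons]
      have hcountP_congr : (PySem.Set.ofList dp).countP (fun k => decide (1 < (x :: rest).count k))
          = (PySem.Set.ofList dp).countP (fun k => decide (1 < dp.count k)) := by
        apply List.countP_congr
        intro k hk
        have hkx : k ≠ x := by
          intro h; subst h; exact hx_not_dp hk
        rw [hcy k hkx]
      rw [hcountP_congr]
      rw [hcx]
      by_cases hr : 0 < tw.length
      · have : (1 < 1 + tw.length) := by omega
        simp only [hrun, hr, if_pos, this, decide_true]
        push_cast
        ring
      · have h0 : tw.length = 0 := by omega
        simp only [hrun, h0, gt_iff_lt, Nat.lt_irrefl, if_false, Nat.add_zero,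
          decide_eq_true_eq]
        ring

theorem A_eq_B (path : List String) : dup_small_count path = dup_small_count_alt path := by
  rw [A_eq_spec]
  unfold dup_small_count_alt
  set lf := path.filter pyStrIslower with hlf
  set s := PySem.List.sorted lf (fun x => x) false with hsrt
  have hperm : s.Perm lf := PySem.List.sorted_perm lf (fun x => x) false
  have hpw : s.Pairwise (· ≤ ·) := by
    have := PySem.List.sorted_pairwise lf (fun x => x)
    simpa using this
  rw [runCountB_sorted s.length s le_rfl hpw]
  -- transport the count expression along the permutation
  have hsets : (PySem.Set.ofList s).Perm (PySem.Set.ofList lf) := by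
    rw [List.perm_ext_iff_of_nodup (PySem.Set.nodup_ofList _) (PySem.Set.nodup_ofList _)]
    intro y
    rw [PySem.Set.mem_ofList, PySem.Set.mem_ofList, hperm.mem_iff]
  have hcnt : ∀ k, s.count k = lf.count k := fun k => hperm.count_eq k
  rw [hsets.countP_eq]
  congr 1
  apply List.countP_congr
  intro k _
  rw [hcnt k]

-- ===== VERDICT (by name: the statement is the Claim_ definition above) =====
theorem dup_small_count_spec : Claim_equal_dup_small_count := by
  intro path _
  exact A_eq_B path
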